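-- pv_equiv track=rewrite | github.com/karthik-siru/practice-simple | DP/dsa_8.py | countFriendsPairings
-- ===== SOURCE A (Python) =====
-- def countFriendsPairings(n):
--     # code here
--
--     a, b, c = 1, 2, 0;
--     if (n <= 2):
--         return n;
--     for i in range(3, n + 1):
--         c = b + (i - 1) * a;
--         a = b;
--         b = c;
--     return c;
-- ===== SOURCE B (Python) =====
-- def countFriendsPairings(n):
--     # Divide-and-conquer product of the 2x2 step matrices of the recurrence
--     # f(i) = f(i-1) + (i-1) * f(i-2); same values as the linear loop, but the
--     # steps are combined as a balanced matrix product (recursion depth O(log n)).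
--     # A structurally different formulation of the same computation.
--     if n <= 2:
--         return n
--
--     def mat(i):
--         # one step: (a, b) -> (b, b + (i - 1) * a), row-major 2x2
--         return (0, 1, i - 1, 1)
--
--     def mul(m, p):
--         m11, m12, m21, m22 = m
--         p11, p12, p21, p22 = p
--         return (m11 * p11 + m12 * p21, m11 * p12 + m12 * p22,
--                 m21 * p11 + m22 * p21, m21 * p12 + m22 * p22)
--
--     def prod(lo, hi):
--         # product mat(hi-1) * ... * mat(lo)
--         if hi - lo <= 1:
--             return mat(lo)
--         mid = (lo + hi) // 2
--         return mul(prod(mid, hi), prod(lo, mid))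
--
--     p = prod(3, n + 1)
--     # apply to the initial vector (a, b) = (1, 2); the answer is the b component
--     return p[2] * 1 + p[3] * 2
-- ===== Notes on version B (the rewrite author's own statement) =====
-- stated objective: alternative
-- what changed: Replaces A's left-to-right linear recurrence loop by a balanced divide-and-conquer product of the 2x2 step matrices of f(i)=f(i-1)+(i-1)*f(i-2), applied to the initial vector (1,2).
import Mathlib
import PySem

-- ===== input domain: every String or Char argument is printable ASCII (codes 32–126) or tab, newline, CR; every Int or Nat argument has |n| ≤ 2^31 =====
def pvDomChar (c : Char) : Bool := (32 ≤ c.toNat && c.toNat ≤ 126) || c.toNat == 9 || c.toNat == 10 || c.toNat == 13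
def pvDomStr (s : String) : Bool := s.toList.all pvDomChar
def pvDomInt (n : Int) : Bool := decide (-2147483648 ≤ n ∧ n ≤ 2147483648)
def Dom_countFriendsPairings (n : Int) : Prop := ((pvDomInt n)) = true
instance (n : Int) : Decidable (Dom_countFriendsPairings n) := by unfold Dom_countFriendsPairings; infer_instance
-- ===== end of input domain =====

-- B replaces A's linear recurrence loop by a balanced divide-and-conquer product of
-- the 2x2 step matrices of f(i) = f(i-1) + (i-1)*f(i-2), applied to the initial
-- vector (1, 2) (objective: alternative algorithm, same values).

-- ===== PORT A =====
-- the loop body: c = b + (i-1)*a; a = b; b = c, on state (a, b, c)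
def pvStepA (s : Int × Int × Int) (i : Int) : Int × Int × Int :=
  let c := s.2.1 + (i - 1) * s.1
  (s.2.1, c, c)

def countFriendsPairings (n : Int) : Int :=
  let a : Int := 1
  let b : Int := 2
  let c : Int := 0
  if n ≤ 2 then n
  else
    let s := (PySem.List.pyRange 3 (n + 1) 1).foldl pvStepA (a, b, c)
    s.2.2

-- ===== PORT B =====
-- mat(i): one step, row-major 2x2
def pvMat (i : Int) : Int × Int × Int × Int := (0, 1, i - 1, 1)

def pvMul (m p : Int × Int × Int × Int) : Int × Int × Int × Int :=
  (m.1 * p.1 + m.2.1 * p.2.2.1, m.1 * p.2.1 + m.2.1 * p.2.2.2,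
   m.2.2.1 * p.1 + m.2.2.2 * p.2.2.1, m.2.2.1 * p.2.1 + m.2.2.2 * p.2.2.2)

-- prod(lo, hi) = mat(hi-1) * ... * mat(lo); indices are the nonnegative range bounds
def pvProd (lo hi : Nat) : Int × Int × Int × Int :=
  if hi - lo ≤ 1 then pvMat (lo : Int)
  else pvMul (pvProd ((lo + hi) / 2) hi) (pvProd lo ((lo + hi) / 2))
termination_by hi - lo
decreasing_by all_goals omega

def countFriendsPairings_alt (n : Int) : Int :=
  if n ≤ 2 then n
  else
    let p := pvProd 3 (n + 1).toNat
    p.2.2.1 * 1 + p.2.2.2 * 2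

-- ===== PRECONDITION & SPEC =====
def Spec_countFriendsPairings (n : Int) (out : Int) : Prop := out = countFriendsPairings_alt n
instance (n : Int) (out : Int) : Decidable (Spec_countFriendsPairings n out) := by unfold Spec_countFriendsPairings; infer_instance

-- ===== CLAIM (what is proved, stated in full; the proofs are below) =====
def Claim_equal_countFriendsPairings : Prop := ∀ (n : Int), Dom_countFriendsPairings n → Spec_countFriendsPairings n (countFriendsPairings n)

-- ===== LEMMAS AND PROOFS =====

-- the ordered product mat(lo+k-1) * ... * mat(lo), defined by structural recursion
def pvF (lo : Nat) : Nat → Int × Int × Int × Int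
  | 0 => (1, 0, 0, 1)
  | k + 1 => pvMul (pvMat (((lo + k : Nat) : Int))) (pvF lo k)

-- apply a 2x2 matrix to a column vector
def pvApp (m : Int × Int × Int × Int) (v : Int × Int) : Int × Int :=
  (m.1 * v.1 + m.2.1 * v.2, m.2.2.1 * v.1 + m.2.2.2 * v.2)

theorem pvMul_assoc (x y z : Int × Int × Int × Int) :
    pvMul (pvMul x y) z = pvMul x (pvMul y z) := by
  obtain ⟨x1, x2, x3, x4⟩ := x
  obtain ⟨y1, y2, y3, y4⟩ := y
  obtain ⟨z1, z2, z3, z4⟩ := z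
  simp only [pvMul, Prod.mk.injEq]
  refine ⟨by ring, by ring, by ring, by ring⟩

theorem pvMul_one_left (x : Int × Int × Int × Int) :
    pvMul (1, 0, 0, 1) x = x := by
  obtain ⟨x1, x2, x3, x4⟩ := x
  simp only [pvMul, Prod.mk.injEq]
  refine ⟨by ring, by ring, by ring, by ring⟩

theorem pvMul_one_right (x : Int × Int × Int × Int) :
    pvMul x (1, 0, 0, 1) = x := by
  obtain ⟨x1, x2, x3, x4⟩ := x
  simp only [pvMul, Prod.mk.injEq]
  refine ⟨by ring, by ring, by ring, by ring⟩

theorem pvApp_mul (m p : Int × Int × Int × Int) (v : Int × Int) :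
    pvApp (pvMul m p) v = pvApp m (pvApp p v) := by
  obtain ⟨m1, m2, m3, m4⟩ := m
  obtain ⟨p1, p2, p3, p4⟩ := p
  obtain ⟨v1, v2⟩ := v
  simp only [pvMul, pvApp, Prod.mk.injEq]
  exact ⟨by ring, by ring⟩

theorem pvF_merge (lo m : Nat) : ∀ k : Nat, pvF lo (m + k) = pvMul (pvF (lo + m) k) (pvF lo m) := by
  intro k
  induction k with
  | zero => simp [pvF, pvMul_one_left]
  | succ k ih =>
      have h1 : m + (k + 1) = (m + k) + 1 := by omega
      rw [h1]
      show pvMul (pvMat (((lo + (m + k) : Nat) : Int))) (pvF lo (m + k)) = _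
      rw [ih, ← pvMul_assoc]
      have h2 : ((lo + (m + k) : Nat) : Int) = (((lo + m) + k : Nat) : Int) := by push_cast; ring
      rw [h2]
      rfl

theorem pvProd_eq_F : ∀ d lo hi : Nat, hi - lo = d → lo < hi → pvProd lo hi = pvF lo (hi - lo) := by
  intro d
  induction d using Nat.strong_induction_on with
  | _ d ih =>
    intro lo hi hd h
    rw [pvProd]
    by_cases hle : hi - lo ≤ 1
    · rw [if_pos hle]
      have h1 : hi - lo = 1 := by omega
      rw [h1]
      show _ = pvMul (pvMat (((lo + 0 : Nat) : Int))) (1, 0, 0, 1)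
      rw [pvMul_one_right]
      simp
    · rw [if_neg hle]
      have hlm : lo < (lo + hi) / 2 := by omega
      have hmh : (lo + hi) / 2 < hi := by omega
      rw [ih (hi - (lo + hi) / 2) (by omega) _ _ rfl hmh,
          ih ((lo + hi) / 2 - lo) (by omega) _ _ rfl hlm]
      have hsum : hi - lo = ((lo + hi) / 2 - lo) + (hi - (lo + hi) / 2) := by omega
      rw [hsum, pvF_merge]
      have : lo + ((lo + hi) / 2 - lo) = (lo + hi) / 2 := by omega
      rw [this]

-- the loop invariant: after processing range(3, 3+k), the state (a, b, c) is
-- (pvF applied to (1,2)), with c = b once the loop has run at least once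
theorem loopA (k : Nat) :
    (PySem.List.pyRange 3 (3 + (k : Int)) 1).foldl pvStepA (1, 2, 0)
      = ((pvApp (pvF 3 k) (1, 2)).1, (pvApp (pvF 3 k) (1, 2)).2,
         if k = 0 then 0 else (pvApp (pvF 3 k) (1, 2)).2) := by
  induction k with
  | zero => simp [PySem.List.pyRange_one_eq_nil, pvF, pvApp]
  | succ k ih =>
      have hb : (3 : Int) ≤ 3 + (k : Int) := by omega
      have hsplit : (3 : Int) + ((k : Nat) + 1 : Nat) = (3 + (k : Int)) + 1 := by push_cast; ring
      rw [hsplit, PySem.List.pyRange_one_succ_right hb, List.foldl_append, ih]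
      have hF : pvF 3 (k + 1) = pvMul (pvMat (3 + (k : Int))) (pvF 3 k) := by
        show pvMul (pvMat (((3 + k : Nat) : Int))) (pvF 3 k) = _
        norm_num
      rw [hF, pvApp_mul]
      simp only [List.foldl_cons, List.foldl_nil, pvStepA, pvApp, pvMat, Prod.mk.injEq,
        Nat.succ_ne_zero, if_false]
      refine ⟨by ring, by ring, by ring⟩

-- ===== VERDICT (by name: the statement is the Claim_ definition above) =====
theorem countFriendsPairings_spec : Claim_equal_countFriendsPairings := by
  intro n _hdom
  unfold Spec_countFriendsPairings countFriendsPairings countFriendsPairings_alt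
  by_cases h : n ≤ 2
  · simp [h]
  · simp only [if_neg h]
    have hn : 3 ≤ n := by omega
    set k := (n - 2).toNat with hk
    have hk1 : (k : Int) = n - 2 := by omega
    have h1 : n + 1 = 3 + (k : Int) := by omega
    have h2 : (n + 1).toNat = 3 + k := by omega
    have hk0 : k ≠ 0 := by omega
    rw [h2, h1, loopA k]
    rw [pvProd_eq_F ((3 + k) - 3) 3 (3 + k) rfl (by omega)]
    have h3 : (3 + k) - 3 = k := by omega
    rw [h3]
    simp only [if_neg hk0, pvApp]
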